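-- pv_equiv track=rewrite | github.com/pypi-data/pypi-mirror-151 | packages/binning-utils-sebastian-achim-mueller/binning_utils_sebastian_achim_mueller-0.0.2-py2.py3-none-any.whl/binning_utils/power10.py | make_decade_and_bin_combinations
-- ===== SOURCE A (Python) =====
-- def make_decade_and_bin_combinations(
--     start_decade, start_bin, stop_decade, stop_bin, num_bins_per_decade=5
-- ):
--     """
--     Computes input-parameters to lower_bin_edge() in a given range.
--
--     Parameters
--     ----------
--     start_decade : int
--     start_bin : int
--     stop_decade : int
--     stop_bin : int
--     num_bins_per_decade : int
--
--     Returns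
--     -------
--     A list of input-parameters to lower_bin_edge().
--     """
--     combos = []
--     decade = start_decade
--     assert 0 <= stop_bin < num_bins_per_decade
--     assert 0 <= start_bin < num_bins_per_decade
--     assert start_decade <= stop_decade
--
--     bin = start_bin
--     while decade != stop_decade or bin != stop_bin:
--         combos.append((decade, bin, num_bins_per_decade))
--         if bin + 1 < num_bins_per_decade:
--             bin += 1
--         else:
--             bin = 0
--             decade += 1
--     return combos
-- ===== SOURCE B (Python) =====
-- def make_decade_and_bin_combinations(
--     start_decade, start_bin, stop_decade, stop_bin, num_bins_per_decade=5
-- ):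
--     assert 0 <= stop_bin < num_bins_per_decade
--     assert 0 <= start_bin < num_bins_per_decade
--     assert start_decade <= stop_decade
--     start = start_decade * num_bins_per_decade + start_bin
--     stop = stop_decade * num_bins_per_decade + stop_bin
--     return [
--         (*divmod(i, num_bins_per_decade), num_bins_per_decade)
--         for i in range(start, stop)
--     ]
-- ===== Notes on version B (the rewrite author's own statement) =====
-- stated objective: simpler
-- what changed: Replaces A's two-variable carry-stepping while-loop with a flat index range start..stop decoded by divmod, keeping the three asserts.
import Mathlib
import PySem

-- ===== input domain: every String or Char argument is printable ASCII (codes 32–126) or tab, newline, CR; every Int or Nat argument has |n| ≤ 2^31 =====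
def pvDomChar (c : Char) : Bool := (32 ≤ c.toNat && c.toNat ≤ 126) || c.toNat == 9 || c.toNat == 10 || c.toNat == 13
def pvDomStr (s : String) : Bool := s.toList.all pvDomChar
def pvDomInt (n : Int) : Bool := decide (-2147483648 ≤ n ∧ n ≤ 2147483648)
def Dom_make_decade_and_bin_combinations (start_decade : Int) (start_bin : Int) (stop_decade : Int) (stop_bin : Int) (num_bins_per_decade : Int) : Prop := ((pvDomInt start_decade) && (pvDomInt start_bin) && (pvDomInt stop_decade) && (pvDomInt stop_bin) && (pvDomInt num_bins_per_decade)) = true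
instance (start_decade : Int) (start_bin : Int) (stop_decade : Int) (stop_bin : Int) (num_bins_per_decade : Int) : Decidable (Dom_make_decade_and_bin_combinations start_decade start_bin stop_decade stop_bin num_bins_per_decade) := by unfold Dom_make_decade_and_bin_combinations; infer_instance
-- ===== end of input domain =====

-- B replaces A's state-stepping while-loop with a flat-index range decoded by divmod (simpler decomposition, same cost).
-- Pre_ additionally excludes inputs where A's loop never terminates (start position past stop position).


-- ===== PORT A =====
-- A's while-loop, made total with a fuel argument (inside Pre_ the fuel equals the
-- exact number of iterations, so the loop is A's loop step for step).
def pvLoopA (n stop_d stop_b : Int) : Nat → Int → Int → List (Int × Int × Int)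
  | 0, _, _ => []
  | fuel + 1, decade, bin =>
    if decade = stop_d ∧ bin = stop_b then []
    else
      (decade, bin, n) ::
        (if bin + 1 < n then pvLoopA n stop_d stop_b fuel decade (bin + 1)
         else pvLoopA n stop_d stop_b fuel (decade + 1) 0)

def make_decade_and_bin_combinations (start_decade : Int) (start_bin : Int) (stop_decade : Int) (stop_bin : Int) (num_bins_per_decade : Int) : List (Int × Int × Int) :=
  pvLoopA num_bins_per_decade stop_decade stop_bin
    ((stop_decade * num_bins_per_decade + stop_bin) - (start_decade * num_bins_per_decade + start_bin)).toNat
    start_decade start_bin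

-- ===== PORT B =====
def make_decade_and_bin_combinations_alt (start_decade : Int) (start_bin : Int) (stop_decade : Int) (stop_bin : Int) (num_bins_per_decade : Int) : List (Int × Int × Int) :=
  let start := start_decade * num_bins_per_decade + start_bin
  let stop := stop_decade * num_bins_per_decade + stop_bin
  (PySem.List.pyRange start stop 1).map
    (fun i => (PySem.Int.floordiv i num_bins_per_decade, PySem.Int.mod i num_bins_per_decade, num_bins_per_decade))

-- ===== PRECONDITION & SPEC =====
-- Pre_ = A's three asserts, plus the flat start position not past the flat stop position:
-- beyond it A's loop steps past (stop_decade, stop_bin) and never terminates (A returns nothing there).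
def Pre_make_decade_and_bin_combinations (start_decade : Int) (start_bin : Int) (stop_decade : Int) (stop_bin : Int) (num_bins_per_decade : Int) : Prop :=
  0 ≤ stop_bin ∧ stop_bin < num_bins_per_decade ∧
  0 ≤ start_bin ∧ start_bin < num_bins_per_decade ∧
  start_decade ≤ stop_decade ∧
  start_decade * num_bins_per_decade + start_bin ≤ stop_decade * num_bins_per_decade + stop_bin
instance (start_decade : Int) (start_bin : Int) (stop_decade : Int) (stop_bin : Int) (num_bins_per_decade : Int) : Decidable (Pre_make_decade_and_bin_combinations start_decade start_bin stop_decade stop_bin num_bins_per_decade) := by unfold Pre_make_decade_and_bin_combinations; infer_instance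

def pvWitness_make_decade_and_bin_combinations : Int × Int × Int × Int × Int := (0, 1, 1, 0, 3)

def Spec_make_decade_and_bin_combinations (start_decade : Int) (start_bin : Int) (stop_decade : Int) (stop_bin : Int) (num_bins_per_decade : Int) (out : List (Int × Int × Int)) : Prop := out = make_decade_and_bin_combinations_alt start_decade start_bin stop_decade stop_bin num_bins_per_decade
instance (start_decade : Int) (start_bin : Int) (stop_decade : Int) (stop_bin : Int) (num_bins_per_decade : Int) (out : List (Int × Int × Int)) : Decidable (Spec_make_decade_and_bin_combinations start_decade start_bin stop_decade stop_bin num_bins_per_decade out) := by unfold Spec_make_decade_and_bin_combinations; infer_instance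

-- ===== CLAIM (what is proved, stated in full; the proofs are below) =====
def Claim_equal_make_decade_and_bin_combinations : Prop := ∀ (start_decade : Int) (start_bin : Int) (stop_decade : Int) (stop_bin : Int) (num_bins_per_decade : Int), Dom_make_decade_and_bin_combinations start_decade start_bin stop_decade stop_bin num_bins_per_decade → Pre_make_decade_and_bin_combinations start_decade start_bin stop_decade stop_bin num_bins_per_decade → Spec_make_decade_and_bin_combinations start_decade start_bin stop_decade stop_bin num_bins_per_decade (make_decade_and_bin_combinations start_decade start_bin stop_decade stop_bin num_bins_per_decade)

-- ===== LEMMAS AND PROOFS =====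

-- Floor-division/mod decode the flat index back into (decade, bin).
theorem pvDecode_floordiv (decade bin n : Int) (h0 : 0 ≤ bin) (h1 : bin < n) :
    PySem.Int.floordiv (decade * n + bin) n = decade := by
  have hn : 0 < n := lt_of_le_of_lt h0 h1
  rw [PySem.Int.floordiv_eq_iff_of_pos hn]
  constructor <;> nlinarith

theorem pvDecode_mod (decade bin n : Int) (h0 : 0 ≤ bin) (h1 : bin < n) :
    PySem.Int.mod (decade * n + bin) n = bin := by
  have hn : 0 < n := lt_of_le_of_lt h0 h1
  have hd := PySem.Int.floordiv_mul_add_mod (decade * n + bin) n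
  rw [pvDecode_floordiv decade bin n h0 h1] at hd
  omega

-- Loop invariant: with fuel = stop_flat − flat, A's loop from (decade, bin) produces the
-- divmod-decoded flat range.
theorem pvLoopA_eq (n td tb : Int) (htb0 : 0 ≤ tb) (htb1 : tb < n) :
    ∀ (fuel : Nat) (decade bin : Int), 0 ≤ bin → bin < n →
      decade * n + bin + fuel = td * n + tb →
      pvLoopA n td tb fuel decade bin =
        (PySem.List.pyRange (decade * n + bin) (td * n + tb) 1).map
          (fun i => (PySem.Int.floordiv i n, PySem.Int.mod i n, n)) := by
  intro fuel
  induction fuel with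
  | zero =>
    intro decade bin h0 h1 hf
    simp only [Nat.cast_zero, add_zero] at hf
    have hn : 0 < n := lt_of_le_of_lt h0 h1
    have hdec : decade = td := by
      rcases lt_trichotomy decade td with h | h | h
      · nlinarith
      · exact h
      · nlinarith
    rw [hf, PySem.List.pyRange_one_eq_nil le_rfl]
    simp [pvLoopA]
  | succ fuel ih =>
    intro decade bin h0 h1 hf
    have hn : 0 < n := lt_of_le_of_lt h0 h1
    have hlt : decade * n + bin < td * n + tb := by
      push_cast at hf; omega
    have hguard : ¬(decade = td ∧ bin = tb) := by
      rintro ⟨rfl, rfl⟩; omega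
    rw [PySem.List.pyRange_one_cons hlt]
    simp only [pvLoopA, if_neg hguard, List.map_cons,
      pvDecode_floordiv decade bin n h0 h1, pvDecode_mod decade bin n h0 h1]
    by_cases hb : bin + 1 < n
    · rw [if_pos hb, ih decade (bin + 1) (by omega) hb (by push_cast at hf ⊢; omega)]
      have : decade * n + (bin + 1) = decade * n + bin + 1 := by ring
      rw [this]
    · rw [if_neg hb, ih (decade + 1) 0 le_rfl hn (by push_cast at hf ⊢; nlinarith)]
      have hbin : bin = n - 1 := by omega
      have : (decade + 1) * n + 0 = decade * n + bin + 1 := by rw [hbin]; ring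
      rw [this]

-- ===== VERDICT (by name: the statement is the Claim_ definition above) =====
theorem make_decade_and_bin_combinations_spec : Claim_equal_make_decade_and_bin_combinations := by
  intro sd sb td tb n _ hpre
  obtain ⟨htb0, htb1, hsb0, hsb1, _, hle⟩ := hpre
  unfold Spec_make_decade_and_bin_combinations make_decade_and_bin_combinations make_decade_and_bin_combinations_alt
  exact pvLoopA_eq n td tb htb0 htb1 _ sd sb hsb0 hsb1 (by omega)
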